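-- pv_equiv track=rewrite | github.com/Cooperative-IA/CooperativeGPT | agent/memory_structures/spatial_memory.py | get_bounds_current_map
-- ===== SOURCE A (Python) =====
-- def get_bounds_current_map(current_map_matrix : list[str]) -> tuple[int, int, int, int]:
--     """
--     Finds the bounds of the current observed map.
--
--     Args:
--         current_map_matrix (list[str]): Current observed map.
--
--     Returns:
--         tuple[int, int, int, int]: Bounds of the current observed map.
--     """
--
--     found_row_min, found_col_min = False, False
--     min_row, min_col = 0, 0
--     max_row, max_col  =  len(current_map_matrix) - 1, len(current_map_matrix[0]) - 1
--     for i in range(len(current_map_matrix)):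
--         row = current_map_matrix[i]
--         if row == '-'*len(row):
--             if not found_row_min:
--                 min_row += 1
--             else:
--                 max_row = i
--                 break
--         elif not found_col_min:
--             found_row_min = True
--             found_col_max = False
--             # Now we need to find the min and max col
--             for j in range(len(row)):
--                 if row[j] == '-':
--                     if not found_col_min:
--                         min_col += 1
--                     elif not found_col_max:
--                         max_col = j
--                         found_col_max = True
--                 else:
--                     found_col_min = True
--     return min_row, min_col, max_row, max_col
-- ===== SOURCE B (Python) =====
-- def _all_dash(row):
--     return all(c == '-' for c in row)
--
-- def _leading(pred, xs):
--     """Length of the longest prefix of xs on which pred holds."""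
--     k = 0
--     for x in xs:
--         if not pred(x):
--             break
--         k += 1
--     return k
--
-- def get_bounds_current_map(current_map_matrix):
--     n = len(current_map_matrix)
--     cols = len(current_map_matrix[0])
--     min_row = _leading(_all_dash, current_map_matrix)
--     if min_row == n:
--         return n, 0, n - 1, cols - 1
--     row = current_map_matrix[min_row]
--     min_col = _leading(lambda c: c == '-', row)
--     k = _leading(lambda c: c != '-', row[min_col:])
--     max_col = min_col + k if min_col + k < len(row) else cols - 1
--     tail = current_map_matrix[min_row + 1:]
--     j = _leading(lambda r: not _all_dash(r), tail)
--     max_row = min_row + 1 + j if j < len(tail) else n - 1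
--     return min_row, min_col, max_row, max_col
-- ===== Notes on version B (the rewrite author's own statement) =====
-- stated objective: simpler
-- what changed: Replaces A's single flag-driven loop (boolean state machine with a nested per-character scan and a break) by a plain decomposition: count leading all-dash rows, read min_col/max_col off the first non-dash row with one shared longest-prefix helper, then locate the next all-dash row.
import Mathlib
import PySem

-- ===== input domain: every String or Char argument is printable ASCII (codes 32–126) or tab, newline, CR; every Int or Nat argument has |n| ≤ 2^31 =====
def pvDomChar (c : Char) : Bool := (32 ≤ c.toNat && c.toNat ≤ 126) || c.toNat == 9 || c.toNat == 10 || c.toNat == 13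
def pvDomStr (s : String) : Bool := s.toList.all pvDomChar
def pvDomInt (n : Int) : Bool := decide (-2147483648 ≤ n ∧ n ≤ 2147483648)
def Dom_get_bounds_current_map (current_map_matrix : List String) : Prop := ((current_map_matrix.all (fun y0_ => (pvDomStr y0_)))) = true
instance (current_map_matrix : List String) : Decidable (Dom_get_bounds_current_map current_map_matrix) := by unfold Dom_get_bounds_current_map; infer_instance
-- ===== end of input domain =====

-- B replaces A's flag-driven loop with nested char scan by a plain decomposition (simpler; same cost):
-- count leading all-dash rows, read min_col/max_col off the first non-dash row, find the next all-dash row.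

-- ===== PORT A =====
-- inner 'for j in range(len(row))' loop of A; state (found_col_min, min_col, max_col); found_col_max is local
def pvA_inner : List Char → Int → Bool → Bool → Int → Int → Bool × Int × Int
  | [], _, fcm, _, mc, xc => (fcm, mc, xc)
  | c :: cs, j, fcm, fcx, mc, xc =>
    if c = '-' then
      if fcm = false then pvA_inner cs (j + 1) fcm fcx (mc + 1) xc
      else if fcx = false then pvA_inner cs (j + 1) fcm true mc j
      else pvA_inner cs (j + 1) fcm fcx mc xc
    else pvA_inner cs (j + 1) true fcx mc xc

-- row == '-'*len(row)
def pvA_dashes (row : String) : Bool := row == String.ofList (List.replicate row.toList.length '-')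

-- outer 'for i in range(len(...))' loop of A, with its break
def pvA_loop : List String → Int → Bool → Bool → Int → Int → Int → Int → Int × Int × Int × Int
  | [], _, _, _, mr, mc, xr, xc => (mr, mc, xr, xc)
  | row :: rest, i, frm, fcm, mr, mc, xr, xc =>
    if pvA_dashes row then
      if frm = false then pvA_loop rest (i + 1) frm fcm (mr + 1) mc xr xc
      else (mr, mc, i, xc)          -- max_row = i; break
    else if fcm = false then
      let r := pvA_inner row.toList 0 fcm false mc xc
      pvA_loop rest (i + 1) true r.1 mr r.2.1 xr r.2.2
    else pvA_loop rest (i + 1) frm fcm mr mc xr xc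

def get_bounds_current_map (current_map_matrix : List String) : Int × Int × Int × Int :=
  -- current_map_matrix[0] raises IndexError on []; Pre_ excludes that input, so getD "" is unreachable
  pvA_loop current_map_matrix 0 false false 0 0
    ((current_map_matrix.length : Int) - 1)
    ((((PySem.List.pyGet? current_map_matrix 0).getD "").toList.length : Int) - 1)

-- ===== PORT B =====
-- _leading(pred, xs): length of the longest prefix of xs on which pred holds
def pvLeading {α : Type} (p : α → Bool) : List α → Nat
  | [] => 0
  | x :: xs => if p x then pvLeading p xs + 1 else 0

-- _all_dash(row)
def pvAllDash (row : String) : Bool := row.toList.all (fun c => c == '-')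

def get_bounds_current_map_alt (current_map_matrix : List String) : Int × Int × Int × Int :=
  let n : Int := current_map_matrix.length
  -- current_map_matrix[0] raises IndexError on []; Pre_ excludes that input, so getD "" is unreachable
  let cols : Int := ((PySem.List.pyGet? current_map_matrix 0).getD "").toList.length
  let min_row := pvLeading pvAllDash current_map_matrix
  if (min_row : Int) = n then (n, 0, n - 1, cols - 1)
  else
    -- current_map_matrix[min_row], row[min_col:], current_map_matrix[min_row+1:]: indices are
    -- nonnegative and in range here, so pyGet?/getD and List.drop are exact for them
    let row := ((PySem.List.pyGet? current_map_matrix (min_row : Int)).getD "").toList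
    let min_col := pvLeading (fun c => c == '-') row
    let k := pvLeading (fun c => c != '-') (row.drop min_col)
    let max_col : Int := if ((min_col : Int) + (k : Int)) < (row.length : Int) then (min_col : Int) + (k : Int) else cols - 1
    let tail := current_map_matrix.drop (min_row + 1)
    let j := pvLeading (fun r => !pvAllDash r) tail
    let max_row : Int := if ((j : Int)) < ((tail.length : Int)) then (min_row : Int) + 1 + (j : Int) else n - 1
    ((min_row : Int), (min_col : Int), max_row, max_col)

-- ===== PRECONDITION & SPEC =====
-- Pre_ excludes only the empty list, on which Python A raises IndexError (current_map_matrix[0]).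
def Pre_get_bounds_current_map (current_map_matrix : List String) : Prop := current_map_matrix ≠ []
instance (current_map_matrix : List String) : Decidable (Pre_get_bounds_current_map current_map_matrix) := by unfold Pre_get_bounds_current_map; infer_instance
def pvWitness_get_bounds_current_map : List String := ["---", "-ab-", "---"]

def Spec_get_bounds_current_map (current_map_matrix : List String) (out : Int × Int × Int × Int) : Prop := out = get_bounds_current_map_alt current_map_matrix
instance (current_map_matrix : List String) (out : Int × Int × Int × Int) : Decidable (Spec_get_bounds_current_map current_map_matrix out) := by unfold Spec_get_bounds_current_map; infer_instance

-- ===== CLAIM (what is proved, stated in full; the proofs are below) =====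
def Claim_equal_get_bounds_current_map : Prop := ∀ (current_map_matrix : List String), Dom_get_bounds_current_map current_map_matrix → Pre_get_bounds_current_map current_map_matrix → Spec_get_bounds_current_map current_map_matrix (get_bounds_current_map current_map_matrix)

-- ===== LEMMAS AND PROOFS =====

-- B-shaped closed description of A's loop result (proof-only helper)
def pvShape (m : List String) (i xr xc : Int) : Int × Int × Int × Int :=
  match m.drop (pvLeading pvAllDash m) with
  | [] => (i + (pvLeading pvAllDash m : Int), 0, xr, xc)
  | row :: tail =>
    (i + (pvLeading pvAllDash m : Int),
     (pvLeading (fun c => c == '-') row.toList : Int),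
     if pvLeading (fun r => !pvAllDash r) tail < tail.length
     then i + (pvLeading pvAllDash m : Int) + 1 + (pvLeading (fun r => !pvAllDash r) tail : Int) else xr,
     if pvLeading (fun c => c == '-') row.toList + pvLeading (fun c => c != '-') (row.toList.drop (pvLeading (fun c => c == '-') row.toList)) < row.toList.length
     then (pvLeading (fun c => c == '-') row.toList : Int) + (pvLeading (fun c => c != '-') (row.toList.drop (pvLeading (fun c => c == '-') row.toList)) : Int)
     else xc)

theorem pvLeading_le_length {α : Type} (p : α → Bool) (xs : List α) : pvLeading p xs ≤ xs.length := by
  induction xs with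
  | nil => simp [pvLeading]
  | cons x xs ih => by_cases h : p x <;> simp [pvLeading, h] <;> omega

theorem pvA_dashes_eq (row : String) : pvA_dashes row = pvAllDash row := by
  unfold pvA_dashes pvAllDash
  rw [Bool.eq_iff_iff, beq_iff_eq, List.all_eq_true]
  constructor
  · intro h c hc
    have hl : row.toList = List.replicate row.toList.length '-' := by
      conv_lhs => rw [h]
      rw [String.toList_ofList]
    simpa using List.eq_of_mem_replicate (hl ▸ hc)
  · intro h
    have hl : row.toList = List.replicate row.toList.length '-' :=
      List.eq_replicate_iff.mpr ⟨rfl, fun b hb => by simpa using h b hb⟩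
    calc row = String.ofList row.toList := (String.ofList_toList).symm
    _ = String.ofList (List.replicate row.toList.length '-') := by rw [← hl]

theorem pvA_inner_tt (cs : List Char) : ∀ (j mc xc : Int),
    pvA_inner cs j true true mc xc = (true, mc, xc) := by
  induction cs with
  | nil => intro j mc xc; rfl
  | cons c cs ih =>
    intro j mc xc
    by_cases h : c = '-' <;> simp [pvA_inner, h, ih]

theorem pvA_inner_tf (cs : List Char) : ∀ (j mc xc : Int),
    pvA_inner cs j true false mc xc =
      (true, mc,
       if pvLeading (fun c => c != '-') cs < cs.length
       then j + (pvLeading (fun c => c != '-') cs : Int) else xc) := by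
  induction cs with
  | nil => intro j mc xc; simp [pvA_inner, pvLeading]
  | cons c cs ih =>
    intro j mc xc
    by_cases h : c = '-'
    · simp [pvA_inner, h, pvA_inner_tt, pvLeading]
    · have hstep : pvA_inner (c :: cs) j true false mc xc = pvA_inner cs (j + 1) true false mc xc := by
        simp [pvA_inner, h]
      rw [hstep, ih]
      have hL : pvLeading (fun c => c != '-') (c :: cs) = pvLeading (fun c => c != '-') cs + 1 := by
        simp [pvLeading, h]
      rw [hL, List.length_cons]
      simp only [Prod.mk.injEq]
      repeat' apply And.intro
      all_goals first
        | trivial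
        | (split_ifs <;> push_cast <;> omega)
        | (push_cast; omega)

theorem pvA_inner_ff (cs : List Char) : ∀ (j mc xc : Int), cs.all (fun c => c == '-') = false →
    pvA_inner cs j false false mc xc =
      (true, mc + (pvLeading (fun c => c == '-') cs : Int),
       if pvLeading (fun c => c == '-') cs + pvLeading (fun c => c != '-') (cs.drop (pvLeading (fun c => c == '-') cs)) < cs.length
       then j + (pvLeading (fun c => c == '-') cs : Int) + (pvLeading (fun c => c != '-') (cs.drop (pvLeading (fun c => c == '-') cs)) : Int)
       else xc) := by
  induction cs with
  | nil => intro j mc xc h; simp at h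
  | cons c cs ih =>
    intro j mc xc h
    by_cases hc : c = '-'
    · have htail : cs.all (fun c => c == '-') = false := by simpa [hc] using h
      have hstep : pvA_inner (c :: cs) j false false mc xc = pvA_inner cs (j + 1) false false (mc + 1) xc := by
        simp [pvA_inner, hc]
      rw [hstep, ih (j + 1) (mc + 1) xc htail]
      have hL1 : pvLeading (fun c => c == '-') (c :: cs) = pvLeading (fun c => c == '-') cs + 1 := by
        simp [pvLeading, hc]
      rw [hL1, List.drop_succ_cons, List.length_cons]
      simp only [Prod.mk.injEq]
      repeat' apply And.intro
      all_goals first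
        | trivial
        | (split_ifs <;> push_cast <;> omega)
        | (push_cast; omega)
    · have hstep : pvA_inner (c :: cs) j false false mc xc = pvA_inner cs (j + 1) true false mc xc := by
        simp [pvA_inner, hc]
      rw [hstep, pvA_inner_tf]
      have hL1 : pvLeading (fun c => c == '-') (c :: cs) = 0 := by simp [pvLeading, hc]
      have hL2 : pvLeading (fun c => c != '-') (c :: cs) = pvLeading (fun c => c != '-') cs + 1 := by
        simp [pvLeading, hc]
      rw [hL1, List.drop_zero, hL2, List.length_cons]
      simp only [Prod.mk.injEq]
      repeat' apply And.intro
      all_goals first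
        | trivial
        | (split_ifs <;> push_cast <;> omega)
        | (push_cast; omega)

theorem pvA_loop_phase2 (rest : List String) : ∀ (i mr mc xr xc : Int),
    pvA_loop rest i true true mr mc xr xc =
      (mr, mc,
       if pvLeading (fun r => !pvAllDash r) rest < rest.length
       then i + (pvLeading (fun r => !pvAllDash r) rest : Int) else xr, xc) := by
  induction rest with
  | nil => intro i mr mc xr xc; simp [pvA_loop, pvLeading]
  | cons row rest ih =>
    intro i mr mc xr xc
    cases hb : pvAllDash row with
    | true =>
      have hdash : pvA_dashes row = true := by rw [pvA_dashes_eq, hb]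
      have h0 : pvLeading (fun r => !pvAllDash r) (row :: rest) = 0 := by simp [pvLeading, hb]
      simp [pvA_loop, hdash, h0]
    | false =>
      have hdash : pvA_dashes row = false := by rw [pvA_dashes_eq, hb]
      have hstep : pvA_loop (row :: rest) i true true mr mc xr xc = pvA_loop rest (i + 1) true true mr mc xr xc := by
        simp [pvA_loop, hdash]
      rw [hstep, ih]
      have hL : pvLeading (fun r => !pvAllDash r) (row :: rest) = pvLeading (fun r => !pvAllDash r) rest + 1 := by
        simp [pvLeading, hb]
      rw [hL, List.length_cons]
      simp only [Prod.mk.injEq]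
      repeat' apply And.intro
      all_goals first
        | trivial
        | (split_ifs <;> push_cast <;> omega)
        | (push_cast; omega)

theorem pvA_loop_phase1 (m : List String) : ∀ (i xr xc : Int),
    pvA_loop m i false false i 0 xr xc = pvShape m i xr xc := by
  induction m with
  | nil => intro i xr xc; simp [pvA_loop, pvShape, pvLeading]
  | cons row rest ih =>
    intro i xr xc
    cases hb : pvAllDash row with
    | true =>
      have hdash : pvA_dashes row = true := by rw [pvA_dashes_eq, hb]
      have hstep : pvA_loop (row :: rest) i false false i 0 xr xc = pvA_loop rest (i + 1) false false (i + 1) 0 xr xc := by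
        simp [pvA_loop, hdash]
      rw [hstep, ih]
      have hL : pvLeading pvAllDash (row :: rest) = pvLeading pvAllDash rest + 1 := by
        simp [pvLeading, hb]
      unfold pvShape
      rw [hL, List.drop_succ_cons]
      cases hdrop : rest.drop (pvLeading pvAllDash rest) with
      | nil =>
        dsimp only
        simp only [Prod.mk.injEq]
        repeat' apply And.intro
        all_goals first
          | trivial
          | (split_ifs <;> push_cast <;> omega)
          | (push_cast; omega)
      | cons r tail =>
        dsimp only
        simp only [Prod.mk.injEq]
        repeat' apply And.intro
        all_goals first
          | trivial
          | (split_ifs <;> push_cast <;> omega)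
          | (push_cast; omega)
    | false =>
      have hdash : pvA_dashes row = false := by rw [pvA_dashes_eq, hb]
      have hall : row.toList.all (fun c => c == '-') = false := by unfold pvAllDash at hb; exact hb
      have hstep : pvA_loop (row :: rest) i false false i 0 xr xc =
          pvA_loop rest (i + 1) true (pvA_inner row.toList 0 false false 0 xc).1 i
            (pvA_inner row.toList 0 false false 0 xc).2.1 xr (pvA_inner row.toList 0 false false 0 xc).2.2 := by
        simp [pvA_loop, hdash]
      rw [hstep, pvA_inner_ff row.toList 0 0 xc hall]
      dsimp only
      rw [pvA_loop_phase2]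
      have hL0 : pvLeading pvAllDash (row :: rest) = 0 := by simp [pvLeading, hb]
      unfold pvShape
      rw [hL0, List.drop_zero]
      dsimp only
      simp only [Prod.mk.injEq]
      repeat' apply And.intro
      all_goals first
        | trivial
        | (split_ifs <;> push_cast <;> omega)
        | (push_cast; omega)

-- ===== VERDICT (by name: the statement is the Claim_ definition above) =====
theorem get_bounds_current_map_spec : Claim_equal_get_bounds_current_map := by
  intro m hdom hpre
  unfold Spec_get_bounds_current_map
  unfold get_bounds_current_map
  rw [pvA_loop_phase1]
  have hle := pvLeading_le_length pvAllDash m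
  by_cases heq : pvLeading pvAllDash m = m.length
  · have hdrop : m.drop (pvLeading pvAllDash m) = [] := by
      rw [List.drop_eq_nil_iff]; omega
    unfold pvShape
    rw [hdrop]
    dsimp only
    unfold get_bounds_current_map_alt
    dsimp only
    rw [if_pos (show ((pvLeading pvAllDash m : Nat) : Int) = (m.length : Int) by exact_mod_cast heq)]
    simp only [Prod.mk.injEq]
    repeat' apply And.intro
    all_goals first
      | trivial
      | (split_ifs <;> push_cast <;> omega)
      | (push_cast; omega)
  · have hlt : pvLeading pvAllDash m < m.length := Nat.lt_of_le_of_ne hle heq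
    have hdrop := List.drop_eq_getElem_cons hlt
    unfold pvShape
    rw [hdrop]
    dsimp only
    unfold get_bounds_current_map_alt
    dsimp only
    rw [if_neg (show ¬(((pvLeading pvAllDash m : Nat) : Int) = (m.length : Int)) from fun hx => heq (by exact_mod_cast hx))]
    rw [show PySem.List.pyGet? m ((pvLeading pvAllDash m : Nat) : Int) = some (m[pvLeading pvAllDash m]) from by
      rw [PySem.List.pyGet?_natCast]; exact List.getElem?_eq_getElem hlt]
    rw [Option.getD_some]
    simp only [Prod.mk.injEq]
    repeat' apply And.intro
    all_goals first
      | trivial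
      | (split_ifs <;> push_cast <;> omega)
      | (push_cast; omega)
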